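-- pv_equiv track=rewrite | github.com/yuqALL/ICU_Alarm_Identification_Net | experiments_scores.py | get_alarm_samples
-- ===== SOURCE A (Python) =====
-- alarm_map = {0: 'VTA', 1: 'ETC', 2: 'VFB', 3: 'EBR', 4: 'ASY'}
--
-- def get_alarm_samples(preds, targets, alarm_types):
--     alarm_preds = {'ALL': []}
--     alarm_targets = {'ALL': []}
--     for i, alarm in enumerate(alarm_types):
--         if alarm_map[alarm] not in alarm_preds:
--             alarm_preds[alarm_map[alarm]] = []
--             alarm_targets[alarm_map[alarm]] = []
--         alarm_preds[alarm_map[alarm]].append(preds[i])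
--         alarm_targets[alarm_map[alarm]].append(targets[i])
--         alarm_preds['ALL'].append(preds[i])
--         alarm_targets['ALL'].append(targets[i])
--     return alarm_preds, alarm_targets
-- ===== SOURCE B (Python) =====
-- alarm_map = {0: 'VTA', 1: 'ETC', 2: 'VFB', 3: 'EBR', 4: 'ASY'}
--
-- def get_alarm_samples(preds, targets, alarm_types):
--     n = len(alarm_types)
--     labels = list(dict.fromkeys(alarm_map[a] for a in alarm_types))
--     alarm_preds = {'ALL': [preds[i] for i in range(n)]}
--     alarm_targets = {'ALL': [targets[i] for i in range(n)]}
--     for lab in labels: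
--         idx = [i for i in range(n) if alarm_map[alarm_types[i]] == lab]
--         alarm_preds[lab] = [preds[i] for i in idx]
--         alarm_targets[lab] = [targets[i] for i in idx]
--     return alarm_preds, alarm_targets
-- ===== Notes on version B (the rewrite author's own statement) =====
-- stated objective: alternative
-- what changed: Replaces A's single accumulating pass (growing per-label lists as it goes) with a group-first structure: the distinct labels are computed once by ordered dedup, then each group's list is built by its own scan over the index range.
import Mathlib
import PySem

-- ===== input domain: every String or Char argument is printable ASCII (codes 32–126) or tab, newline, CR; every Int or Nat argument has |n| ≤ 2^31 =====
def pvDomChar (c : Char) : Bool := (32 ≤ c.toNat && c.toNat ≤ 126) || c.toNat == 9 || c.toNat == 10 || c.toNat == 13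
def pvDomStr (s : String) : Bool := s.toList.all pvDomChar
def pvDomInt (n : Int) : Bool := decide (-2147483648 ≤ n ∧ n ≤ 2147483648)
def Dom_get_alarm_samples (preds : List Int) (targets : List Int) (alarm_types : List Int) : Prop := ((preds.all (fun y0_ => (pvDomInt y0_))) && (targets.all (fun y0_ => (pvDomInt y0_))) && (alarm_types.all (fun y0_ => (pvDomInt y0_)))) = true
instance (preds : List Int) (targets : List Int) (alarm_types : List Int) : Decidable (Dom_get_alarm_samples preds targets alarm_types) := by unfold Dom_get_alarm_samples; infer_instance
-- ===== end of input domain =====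

-- B replaces A's single accumulating pass with a group-first structure (dedup the labels, then one scan per label); same cost class (objective: alternative).

-- ===== PORT A =====
-- module-level constant alarm_map, shared by both implementations
def pvAlarmMap : PySem.Dict Int String :=
  PySem.Dict.ofList [(0, "VTA"), (1, "ETC"), (2, "VFB"), (3, "EBR"), (4, "ASY")]
def pvLabel (a : Int) : String := pvAlarmMap.getD a ""

def pvStepA (preds targets : List Int)
    (st : PySem.Dict String (List Int) × PySem.Dict String (List Int)) (ia : Int × Int) :
    PySem.Dict String (List Int) × PySem.Dict String (List Int) :=
  let lab := pvLabel ia.2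
  let p := PySem.List.pyGetD preds ia.1 0
  let t := PySem.List.pyGetD targets ia.1 0
  let st := if st.1.contains lab then st else (st.1.insert lab [], st.2.insert lab [])
  ((st.1.modify lab [] (· ++ [p])).modify "ALL" [] (· ++ [p]),
   (st.2.modify lab [] (· ++ [t])).modify "ALL" [] (· ++ [t]))

def get_alarm_samples (preds : List Int) (targets : List Int) (alarm_types : List Int) :
    (List (String × List Int)) × (List (String × List Int)) :=
  let final := (PySem.List.enumerate alarm_types).foldl (pvStepA preds targets)
    (PySem.Dict.empty.insert "ALL" [], PySem.Dict.empty.insert "ALL" [])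
  (final.1.items, final.2.items)

-- ===== PORT B =====
-- [i for i in range(n) if alarm_map[alarm_types[i]] == lab]
def pvIdx (alarm_types : List Int) (lab : String) : List Int :=
  (PySem.List.pyRange 0 (PySem.List.len alarm_types)).filter
    (fun i => pvLabel (PySem.List.pyGetD alarm_types i 0) == lab)

def get_alarm_samples_alt (preds : List Int) (targets : List Int) (alarm_types : List Int) :
    (List (String × List Int)) × (List (String × List Int)) :=
  let n := PySem.List.len alarm_types
  let labels := PySem.List.dedup (alarm_types.map pvLabel)
  let allP := (PySem.List.pyRange 0 n).map (fun i => PySem.List.pyGetD preds i 0)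
  let allT := (PySem.List.pyRange 0 n).map (fun i => PySem.List.pyGetD targets i 0)
  let final := labels.foldl
    (fun st lab =>
      (st.1.insert lab ((pvIdx alarm_types lab).map (fun i => PySem.List.pyGetD preds i 0)),
       st.2.insert lab ((pvIdx alarm_types lab).map (fun i => PySem.List.pyGetD targets i 0))))
    (PySem.Dict.empty.insert "ALL" allP, PySem.Dict.empty.insert "ALL" allT)
  (final.1.items, final.2.items)

-- ===== PRECONDITION & SPEC =====
-- Pre_ excludes exactly the inputs on which the Python A raises: KeyError (an alarm type outside
-- alarm_map's keys 0..4) or IndexError (preds/targets shorter than alarm_types).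
def Pre_get_alarm_samples (preds : List Int) (targets : List Int) (alarm_types : List Int) : Prop :=
  alarm_types.length ≤ preds.length ∧ alarm_types.length ≤ targets.length ∧
    ∀ a ∈ alarm_types, 0 ≤ a ∧ a < 5

instance (preds : List Int) (targets : List Int) (alarm_types : List Int) :
    Decidable (Pre_get_alarm_samples preds targets alarm_types) := by
  unfold Pre_get_alarm_samples; infer_instance

def pvWitness_get_alarm_samples : List Int × List Int × List Int :=
  ([1, 0, 1], [1, 1, 0], [0, 2, 0])

def Spec_get_alarm_samples (preds : List Int) (targets : List Int) (alarm_types : List Int)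
    (out : (List (String × List Int)) × (List (String × List Int))) : Prop :=
  out = get_alarm_samples_alt preds targets alarm_types

instance (preds : List Int) (targets : List Int) (alarm_types : List Int)
    (out : (List (String × List Int)) × (List (String × List Int))) :
    Decidable (Spec_get_alarm_samples preds targets alarm_types out) := by
  unfold Spec_get_alarm_samples; infer_instance

-- ===== CLAIM (what is proved, stated in full; the proofs are below) =====
def Claim_equal_get_alarm_samples : Prop := ∀ (preds : List Int) (targets : List Int) (alarm_types : List Int), Dom_get_alarm_samples preds targets alarm_types → Pre_get_alarm_samples preds targets alarm_types → Spec_get_alarm_samples preds targets alarm_types (get_alarm_samples preds targets alarm_types)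

-- ===== LEMMAS AND PROOFS =====
-- A's ports agree with B's unconditionally in Lean (the PySem defaults used off Pre_ coincide);
-- Pre_ marks where the Python A returns at all.

lemma pvLabel_ne_ALL (a : Int) : pvLabel a ≠ "ALL" := by
  have h : pvAlarmMap.items = [(0, "VTA"), (1, "ETC"), (2, "VFB"), (3, "EBR"), (4, "ASY")] := by
    decide
  simp only [pvLabel, PySem.Dict.getD, PySem.Dict.get?, h, List.find?]
  repeat' split
  all_goals simp_all
lemma pvModify_cond (d : PySem.Dict String (List Int)) (lab : String) (f : List Int → List Int)
    (h : d.contains lab = false) :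
    (d.insert lab []).modify lab [] f = d.modify lab [] f := by
  simp [PySem.Dict.modify, PySem.Dict.insert_insert_self, PySem.Dict.getD_insert_self,
    PySem.Dict.getD_of_not_contains d [] h]

lemma pvStepA_eq (preds targets : List Int) (d1 d2 : PySem.Dict String (List Int))
    (ia : Int × Int) (hc : d1.contains (pvLabel ia.2) = d2.contains (pvLabel ia.2)) :
    pvStepA preds targets (d1, d2) ia =
      ((d1.modify (pvLabel ia.2) [] (· ++ [PySem.List.pyGetD preds ia.1 0])).modify "ALL" []
          (· ++ [PySem.List.pyGetD preds ia.1 0]),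
       (d2.modify (pvLabel ia.2) [] (· ++ [PySem.List.pyGetD targets ia.1 0])).modify "ALL" []
          (· ++ [PySem.List.pyGetD targets ia.1 0])) := by
  by_cases h : d1.contains (pvLabel ia.2) = true
  · simp [pvStepA, h]
  · simp only [Bool.not_eq_true] at h
    simp [pvStepA, h, pvModify_cond _ _ _ h, pvModify_cond _ _ _ (hc ▸ h)]

lemma pvKeys_modify (d : PySem.Dict String (List Int)) (k : String) (f : List Int → List Int) :
    (d.modify k [] f).keys = PySem.Set.add d.keys k := by
  rw [PySem.Dict.keys_modify, PySem.Set.add]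
  by_cases h : d.contains k = true
  · rw [PySem.Dict.keys_insert_of_contains d _ h]
    simp [PySem.Set.contains, ← PySem.Dict.contains_iff_mem_keys, h]
  · simp only [Bool.not_eq_true] at h
    rw [PySem.Dict.keys_insert_of_not_contains d _ h]
    have hk : k ∉ d.keys := fun hm => by
      rw [← PySem.Dict.contains_iff_mem_keys] at hm; rw [h] at hm; exact Bool.false_ne_true hm
    simp [PySem.Set.contains, hk]

lemma pvSet_add_of_mem {s : PySem.Set String} {a : String} (h : a ∈ s) : s.add a = s := by
  simp [PySem.Set.add, PySem.Set.contains, h]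

lemma pvSet_update_cons (a : String) :
    ∀ (ys : List String) (s : PySem.Set String), (∀ y ∈ ys, y ≠ a) →
      PySem.Set.update (a :: s) ys = a :: PySem.Set.update s ys := by
  intro ys
  induction ys with
  | nil => intro s _; rfl
  | cons y ys ih =>
    intro s hne
    have hya : y ≠ a := hne y (by simp)
    have : PySem.Set.add (a :: s) y = a :: PySem.Set.add s y := by
      simp only [PySem.Set.add, PySem.Set.contains, List.contains_cons]
      have hya' : (y == a) = false := by simp [hya]
      rw [hya']
      simp only [Bool.false_or]
      by_cases h : List.contains s y = true
      · rw [if_pos h, if_pos h]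
      · rw [if_neg h, if_neg h, List.cons_append]
    simp only [PySem.Set.update, List.foldl_cons] at *
    rw [this, ih _ (fun y hy => hne y (by simp [hy]))]

lemma pvGetD_step (d : PySem.Dict String (List Int)) (lab : String) (hlab : lab ≠ "ALL")
    (v : Int) (k : String) :
    ((d.modify lab [] (· ++ [v])).modify "ALL" [] (· ++ [v])).getD k [] =
      if lab == k || k == "ALL" then d.getD k [] ++ [v] else d.getD k [] := by
  rw [PySem.Dict.getD_modify, PySem.Dict.getD_modify]
  by_cases hA : k = "ALL"
  · subst hA
    simp [Ne.symm hlab]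
  · by_cases hk : k = lab
    · subst hk
      simp [hA]
    · rw [if_neg hA, PySem.Dict.getD_modify, if_neg hk]
      have h1 : (lab == k) = false := by simp [Ne.symm hk]
      have h2 : (k == "ALL") = false := by simp [hA]
      simp [h1, h2]

lemma pvFoldA_char (preds targets : List Int) :
    ∀ (l : List (Int × Int)) (d1 d2 : PySem.Dict String (List Int)),
      d1.keys = d2.keys → "ALL" ∈ d1.keys →
      ((l.foldl (pvStepA preds targets) (d1, d2)).1.keys =
          PySem.Set.update d1.keys (l.map (fun ia => pvLabel ia.2))) ∧
      ((l.foldl (pvStepA preds targets) (d1, d2)).2.keys =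
          (l.foldl (pvStepA preds targets) (d1, d2)).1.keys) ∧
      (∀ k, (l.foldl (pvStepA preds targets) (d1, d2)).1.getD k [] =
          d1.getD k [] ++ (l.filter (fun ia => pvLabel ia.2 == k || k == "ALL")).map
            (fun ia => PySem.List.pyGetD preds ia.1 0)) ∧
      (∀ k, (l.foldl (pvStepA preds targets) (d1, d2)).2.getD k [] =
          d2.getD k [] ++ (l.filter (fun ia => pvLabel ia.2 == k || k == "ALL")).map
            (fun ia => PySem.List.pyGetD targets ia.1 0)) := by
  intro l
  induction l with
  | nil => intro d1 d2 hk _; exact ⟨rfl, hk.symm, fun k => by simp, fun k => by simp⟩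
  | cons ia rest ih =>
    intro d1 d2 hk hALL
    have hlab := pvLabel_ne_ALL ia.2
    have hc : d1.contains (pvLabel ia.2) = d2.contains (pvLabel ia.2) := by
      rw [PySem.Dict.contains_eq_decide_mem_keys, PySem.Dict.contains_eq_decide_mem_keys, hk]
    set lab := pvLabel ia.2 with hlabdef
    set p := PySem.List.pyGetD preds ia.1 0 with hp
    set t := PySem.List.pyGetD targets ia.1 0 with ht
    set d1' := (d1.modify lab [] (· ++ [p])).modify "ALL" [] (· ++ [p]) with hd1'
    set d2' := (d2.modify lab [] (· ++ [t])).modify "ALL" [] (· ++ [t]) with hd2'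
    have hstep : pvStepA preds targets (d1, d2) ia = (d1', d2') := pvStepA_eq _ _ _ _ _ hc
    have hk' : d1'.keys = d2'.keys := by
      rw [hd1', hd2', pvKeys_modify, pvKeys_modify, pvKeys_modify, pvKeys_modify, hk]
    have hkeys1 : d1'.keys = PySem.Set.add d1.keys lab := by
      rw [hd1', pvKeys_modify, pvKeys_modify, pvSet_add_of_mem]
      rw [PySem.Set.mem_add]
      exact Or.inl hALL
    have hALL' : "ALL" ∈ d1'.keys := by
      rw [hkeys1, PySem.Set.mem_add]; exact Or.inl hALL
    obtain ⟨ik, ik2, igp, igt⟩ := ih d1' d2' hk' hALL'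
    rw [List.foldl_cons, hstep]
    refine ⟨?_, ik2, ?_, ?_⟩
    · rw [ik, hkeys1]
      simp only [PySem.Set.update, List.map_cons, List.foldl_cons]
      rfl
    · intro k
      have hstep1 := pvGetD_step d1 lab hlab p k
      rw [← hd1'] at hstep1
      rw [igp k, hstep1]
      by_cases hcond : (lab == k || k == "ALL") = true
      · simp only [List.filter_cons, hlabdef ▸ hcond, hcond]
        simp [← hp, List.append_assoc]
      · simp only [Bool.not_eq_true] at hcond
        simp [hlabdef ▸ hcond, hcond]
    · intro k
      have hstep2 := pvGetD_step d2 lab hlab t k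
      rw [← hd2'] at hstep2
      rw [igt k, hstep2]
      by_cases hcond : (lab == k || k == "ALL") = true
      · simp only [List.filter_cons, hlabdef ▸ hcond, hcond]
        simp [← ht, List.append_assoc]
      · simp only [Bool.not_eq_true] at hcond
        simp [hlabdef ▸ hcond, hcond]

-- B's side: each dict is an "ALL" insert followed by fresh-label inserts, so its items list is literal
lemma pvAlt_side (xs alarm_types : List Int) :
    ((PySem.Set.ofList (alarm_types.map pvLabel)).foldl
        (fun d lab => d.insert lab ((pvIdx alarm_types lab).map (fun i => PySem.List.pyGetD xs i 0)))
        (PySem.Dict.empty.insert "ALL"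
          ((PySem.List.pyRange 0 (PySem.List.len alarm_types)).map
            (fun i => PySem.List.pyGetD xs i 0)))).items =
      ("ALL", (PySem.List.pyRange 0 (PySem.List.len alarm_types)).map
          (fun i => PySem.List.pyGetD xs i 0)) ::
        (PySem.Set.ofList (alarm_types.map pvLabel)).map
          (fun lab => (lab, (pvIdx alarm_types lab).map (fun i => PySem.List.pyGetD xs i 0))) := by
  have hfresh : ∀ lab ∈ PySem.Set.ofList (alarm_types.map pvLabel),
      (PySem.Dict.empty.insert "ALL"
        ((PySem.List.pyRange 0 (PySem.List.len alarm_types)).map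
          (fun i => PySem.List.pyGetD xs i 0))).contains lab = false := by
    intro lab hlab
    rw [PySem.Set.mem_ofList] at hlab
    obtain ⟨a, _, ha⟩ := List.mem_map.mp hlab
    rw [PySem.Dict.contains_insert]
    simp [ha ▸ pvLabel_ne_ALL a, PySem.Dict.contains_empty]
  have := PySem.Dict.items_foldl_insert_fresh (PySem.Set.ofList (alarm_types.map pvLabel))
    (fun lab => lab)
    (fun lab => (pvIdx alarm_types lab).map (fun i => PySem.List.pyGetD xs i 0))
    _ hfresh (by simp [PySem.Set.nodup_ofList])
  rw [this, PySem.Dict.items_insert_of_not_contains _ _ (PySem.Dict.contains_empty _)]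
  simp [PySem.Dict.empty]

lemma pvMain (preds targets alarm_types : List Int) :
    get_alarm_samples preds targets alarm_types = get_alarm_samples_alt preds targets alarm_types := by
  set l := PySem.List.enumerate alarm_types with hl
  set labels := PySem.Set.ofList (alarm_types.map pvLabel) with hlabels
  set d0 : PySem.Dict String (List Int) := PySem.Dict.empty.insert "ALL" [] with hd0
  have hkeys0 : d0.keys = ["ALL"] := by
    rw [hd0, PySem.Dict.keys_insert_of_not_contains _ _ (PySem.Dict.contains_empty _)]
    simp [PySem.Dict.keys_empty]
  obtain ⟨ik, ik2, igp, igt⟩ := pvFoldA_char preds targets l d0 d0 rfl (by rw [hkeys0]; simp)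
  have hlabmap : l.map (fun ia => pvLabel ia.2) = alarm_types.map pvLabel := by
    have : alarm_types.map pvLabel = (l.map (fun x => x.2)).map pvLabel := by
      rw [hl, PySem.List.map_snd_enumerate]
    rw [this, List.map_map]
    rfl
  have hne : ∀ y ∈ alarm_types.map pvLabel, y ≠ "ALL" := by
    intro y hy
    obtain ⟨a, _, ha⟩ := List.mem_map.mp hy
    exact ha ▸ pvLabel_ne_ALL a
  have hAkeys : (l.foldl (pvStepA preds targets) (d0, d0)).1.keys = "ALL" :: labels := by
    rw [ik, hkeys0, hlabmap, pvSet_update_cons "ALL" (alarm_types.map pvLabel) [] hne]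
    rfl
  have hnodup : ("ALL" :: labels).Nodup := by
    refine List.Nodup.cons ?_ (PySem.Set.nodup_ofList _)
    intro hmem
    rw [hlabels, PySem.Set.mem_ofList] at hmem
    exact hne _ hmem rfl
  have hgD0 : ∀ k : String, d0.getD k [] = [] := by
    intro k
    by_cases h : k = "ALL"
    · subst h; rw [hd0, PySem.Dict.getD_insert_self]
    · rw [hd0, PySem.Dict.getD_insert, if_neg h, PySem.Dict.getD_empty]
  have hALLval : ∀ xs : List Int,
      (l.filter (fun ia => pvLabel ia.2 == "ALL" || "ALL" == "ALL")).map
          (fun ia => PySem.List.pyGetD xs ia.1 0) =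
        (PySem.List.pyRange 0 (PySem.List.len alarm_types)).map
          (fun i => PySem.List.pyGetD xs i 0) := by
    intro xs
    have : (fun ia : Int × Int => pvLabel ia.2 == "ALL" || "ALL" == "ALL") = fun _ => true := by
      funext ia; simp
    rw [this, List.filter_true, hl, PySem.List.enumerate_eq_map_pyRange alarm_types 0,
      List.map_map]
    rfl
  have hLabval : ∀ (xs : List Int) (k : String), k ≠ "ALL" →
      (l.filter (fun ia => pvLabel ia.2 == k || k == "ALL")).map
          (fun ia => PySem.List.pyGetD xs ia.1 0) =
        (pvIdx alarm_types k).map (fun i => PySem.List.pyGetD xs i 0) := by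
    intro xs k hk
    have h2 : (k == "ALL") = false := by simp [hk]
    have : (fun ia : Int × Int => pvLabel ia.2 == k || k == "ALL") =
        fun ia : Int × Int => pvLabel ia.2 == k := by
      funext ia; rw [h2, Bool.or_false]
    rw [this, hl, PySem.List.enumerate_eq_map_pyRange alarm_types 0, List.filter_map,
      List.map_map]
    rfl
  show ((l.foldl (pvStepA preds targets) (d0, d0)).1.items,
        (l.foldl (pvStepA preds targets) (d0, d0)).2.items) = _
  have hitems1 : (l.foldl (pvStepA preds targets) (d0, d0)).1.items =
      ("ALL" :: labels).map (fun k => (k, (l.foldl (pvStepA preds targets) (d0, d0)).1.getD k [])) :=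
    hAkeys ▸ PySem.Dict.items_eq_map_keys _ (hAkeys ▸ hnodup) []
  have hitems2 : (l.foldl (pvStepA preds targets) (d0, d0)).2.items =
      ("ALL" :: labels).map (fun k => (k, (l.foldl (pvStepA preds targets) (d0, d0)).2.getD k [])) := by
    have hk2 := ik2.trans hAkeys
    exact hk2 ▸ PySem.Dict.items_eq_map_keys _ (hk2 ▸ hnodup) []
  rw [hitems1, hitems2]
  show _ = ((get_alarm_samples_alt preds targets alarm_types).1,
            (get_alarm_samples_alt preds targets alarm_types).2)
  have halt : get_alarm_samples_alt preds targets alarm_types =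
      (("ALL", (PySem.List.pyRange 0 (PySem.List.len alarm_types)).map
          (fun i => PySem.List.pyGetD preds i 0)) ::
        labels.map (fun lab => (lab, (pvIdx alarm_types lab).map (fun i => PySem.List.pyGetD preds i 0))),
       ("ALL", (PySem.List.pyRange 0 (PySem.List.len alarm_types)).map
          (fun i => PySem.List.pyGetD targets i 0)) ::
        labels.map (fun lab => (lab, (pvIdx alarm_types lab).map (fun i => PySem.List.pyGetD targets i 0)))) := by
    show (_, _) = _
    rw [show PySem.List.dedup (alarm_types.map pvLabel) = labels from rfl]
    have hsplit := PySem.List.foldl_prod_mk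
      (f := fun d lab => d.insert lab ((pvIdx alarm_types lab).map (fun i => PySem.List.pyGetD preds i 0)))
      (g := fun d lab => d.insert lab ((pvIdx alarm_types lab).map (fun i => PySem.List.pyGetD targets i 0)))
      labels
      (PySem.Dict.empty.insert "ALL"
        ((PySem.List.pyRange 0 (PySem.List.len alarm_types)).map (fun i => PySem.List.pyGetD preds i 0)))
      (PySem.Dict.empty.insert "ALL"
        ((PySem.List.pyRange 0 (PySem.List.len alarm_types)).map (fun i => PySem.List.pyGetD targets i 0)))
    simp only [hsplit, Prod.mk.injEq]
    exact ⟨pvAlt_side preds alarm_types, pvAlt_side targets alarm_types⟩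
  rw [halt]
  rw [Prod.mk.injEq]
  constructor
  · simp only [List.map_cons]
    congr 1
    · rw [igp "ALL", hgD0, List.nil_append, hALLval]
    · apply List.map_congr_left
      intro k hk
      have hkA : k ≠ "ALL" := by
        rw [hlabels, PySem.Set.mem_ofList] at hk
        exact hne _ hk
      rw [igp k, hgD0, List.nil_append, hLabval preds k hkA]
  · simp only [List.map_cons]
    congr 1
    · rw [igt "ALL", hgD0, List.nil_append, hALLval]
    · apply List.map_congr_left
      intro k hk
      have hkA : k ≠ "ALL" := by
        rw [hlabels, PySem.Set.mem_ofList] at hk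
        exact hne _ hk
      rw [igt k, hgD0, List.nil_append, hLabval targets k hkA]

-- ===== VERDICT (by name: the statement is the Claim_ definition above) =====
theorem get_alarm_samples_spec : Claim_equal_get_alarm_samples := by
  intro preds targets alarm_types _ _
  unfold Spec_get_alarm_samples
  exact pvMain preds targets alarm_types
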